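-- pv_equiv track=rewrite | github.com/Tatiana952/Python_homework | sem4/home5.py | f
-- ===== SOURCE A (Python) =====
-- def f(lstt = []):
--     i = 0
--     while i < len(lstt):
--         if lstt[i] == '-':
--             lstt[i] += lstt[i+1]
--             lstt.pop(i+1)
--         elif lstt[i] == '+':
--             lstt.pop(i)
--         i += 1
--     return(lstt)
-- ===== SOURCE B (Python) =====
-- # Single forward pass over the input with an index pointer, building a new
-- # output list (A mutates lstt in place; B leaves it untouched -- the
-- # equivalence claimed is about the return value only).
-- def f(lstt = []):
--     out = []
--     i = 0
--     n = len(lstt)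
--     while i < n:
--         x = lstt[i]
--         if x == '-':
--             out.append(x + lstt[i + 1])  # IndexError here exactly where A raises
--             i += 2
--         elif x == '+':
--             if i + 1 < n:
--                 out.append(lstt[i + 1])
--             i += 2
--         else:
--             out.append(x)
--             i += 1
--     return out
-- ===== Notes on version B (the rewrite author's own statement) =====
-- stated objective: alternative
-- what changed: A repeatedly rewrites the list in place with set/pop calls and returns the mutated argument; B makes one forward pass over the untouched input with an index pointer, appending to a fresh output list, and does not mutate its argument.
import Mathlib
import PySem

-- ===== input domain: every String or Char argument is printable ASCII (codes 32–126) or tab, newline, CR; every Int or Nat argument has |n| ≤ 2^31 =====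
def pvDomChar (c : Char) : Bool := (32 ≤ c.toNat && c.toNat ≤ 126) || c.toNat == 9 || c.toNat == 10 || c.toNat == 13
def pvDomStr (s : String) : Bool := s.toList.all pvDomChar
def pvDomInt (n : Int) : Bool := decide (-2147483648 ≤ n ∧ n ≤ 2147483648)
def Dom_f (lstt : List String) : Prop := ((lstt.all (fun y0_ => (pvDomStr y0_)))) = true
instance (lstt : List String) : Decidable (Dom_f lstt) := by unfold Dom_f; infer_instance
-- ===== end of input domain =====

-- B replaces A's in-place pop/merge rewriting with one forward pass over the
-- untouched input building a fresh output list; the equivalence claimed is about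
-- the RETURN value only (A mutates its argument in place, B does not).

-- ===== PORT A =====
-- A's while loop over the mutating list: i is the cursor; lstt[i] == '-' merges
-- the next element in place and pops it; '+' pops itself; indexing/pop are exact
-- here since all indices used are nonnegative and in range (out-of-range
-- lstt[i+1] is Python's IndexError = the `none` branch, excluded by Pre_f).
def fLoop (lst : List String) (i : Nat) : List String :=
  if h : i < lst.length then
    if lst[i] == "-" then
      match lst[i+1]? with
      | some y => fLoop ((lst.set i (lst[i] ++ y)).eraseIdx (i+1)) (i+1)
      | none => lst      -- IndexError in Python
    else if lst[i] == "+" then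
      fLoop (lst.eraseIdx i) (i+1)
    else
      fLoop lst (i+1)
  else lst
termination_by lst.length - i
decreasing_by
  · have h1 := List.length_eraseIdx_le ((lst.set i (lst[i] ++ y))) (i+1)
    simp at h1; omega
  · have h1 := List.length_eraseIdx_le lst i
    omega
  · omega

def f (lstt : List String) : List String := fLoop lstt 0

-- ===== PORT B =====
-- B's while loop: cursor i over the unchanged input, `out` is the accumulator.
def fAltLoop (lst : List String) (i : Nat) (out : List String) : List String :=
  if h : i < lst.length then
    if lst[i] == "-" then
      match lst[i+1]? with
      | some y => fAltLoop lst (i+2) (out ++ [lst[i] ++ y])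
      | none => out      -- IndexError in Python
    else if lst[i] == "+" then
      match lst[i+1]? with
      | some z => fAltLoop lst (i+2) (out ++ [z])
      | none => fAltLoop lst (i+2) out
    else
      fAltLoop lst (i+1) (out ++ [lst[i]])
  else out
termination_by lst.length - i
decreasing_by all_goals omega

def f_alt (lstt : List String) : List String := fAltLoop lstt 0 []

-- ===== PRECONDITION & SPEC =====
-- Pre_f excludes exactly the inputs on which A raises IndexError: those where the
-- scan (which skips one element after each processed '-' or '+') meets a '-' with
-- nothing after it.
def okF : List String → Bool
  | [] => true
  | x :: r =>
    if x == "-" then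
      match r with
      | [] => false
      | _ :: r' => okF r'
    else if x == "+" then
      match r with
      | [] => true
      | _ :: r' => okF r'
    else okF r

def Pre_f (lstt : List String) : Prop := okF lstt = true
instance (lstt : List String) : Decidable (Pre_f lstt) := by unfold Pre_f; infer_instance

def pvWitness_f : List String := ["a", "-", "b", "+", "c", "-", ""]

def Spec_f (lstt : List String) (out : List String) : Prop := out = f_alt lstt
instance (lstt : List String) (out : List String) : Decidable (Spec_f lstt out) := by unfold Spec_f; infer_instance

-- ===== CLAIM (what is proved, stated in full; the proofs are below) =====
def Claim_equal_f : Prop := ∀ (lstt : List String), Dom_f lstt → Pre_f lstt → Spec_f lstt (f lstt)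

-- ===== LEMMAS AND PROOFS =====

-- what both loops compute on the unprocessed suffix (A's error case returns the
-- whole current list = prefix ++ [x], hence the [x] in the "-"/[] branch)
def sufF : List String → List String
  | [] => []
  | x :: r =>
    if x == "-" then
      match r with
      | [] => [x]
      | y :: r' => (x ++ y) :: sufF r'
    else if x == "+" then
      match r with
      | [] => []
      | z :: r' => z :: sufF r'
    else x :: sufF r

theorem fLoop_eq : ∀ (n : Nat) (suf pre : List String), suf.length = n →
    fLoop (pre ++ suf) pre.length = pre ++ sufF suf := by
  intro n
  induction n using Nat.strong_induction_on with
  | _ n IH =>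
    intro suf pre hlen
    cases suf with
    | nil => rw [fLoop]; simp [sufF]
    | cons x r =>
      have hx : (pre ++ x :: r)[pre.length]'(by simp) = x := by simp
      have h1 : (pre ++ x :: r)[pre.length + 1]? = r[0]? := by
        rw [List.getElem?_append_right (by omega)]; simp
      rw [fLoop, dif_pos (by simp : pre.length < (pre ++ x :: r).length)]
      simp only [hx, h1]
      by_cases hminus : x = "-"
      · subst hminus
        cases r with
        | nil => simp [sufF]
        | cons y r' =>
          have hset : (pre ++ ("-" : String) :: y :: r').set pre.length ("-" ++ y) = pre ++ (("-" : String) ++ y) :: y :: r' := by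
            rw [List.set_append_right _ _ (by omega)]; simp
          have herase : (pre ++ (("-" : String) ++ y) :: y :: r').eraseIdx (pre.length + 1) = pre ++ (("-" : String) ++ y) :: r' := by
            rw [List.eraseIdx_append_of_length_le (by omega)]; simp
          have hL : pre ++ (("-" : String) ++ y) :: r' = (pre ++ ["-" ++ y]) ++ r' := by simp
          have hlen2 : pre.length + 1 = (pre ++ [("-" : String) ++ y]).length := by simp
          simp only [beq_self_eq_true, if_true, List.getElem?_cons_zero]
          rw [hset, herase, hL, hlen2, IH r'.length (by simp at hlen; omega) r' (pre ++ [("-" : String) ++ y]) rfl]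
          simp [sufF]
      · by_cases hplus : x = "+"
        · subst hplus
          have herase : (pre ++ ("+" : String) :: r).eraseIdx pre.length = pre ++ r := by
            rw [List.eraseIdx_append_of_length_le (by omega)]; simp
          simp only [beq_self_eq_true, if_true, if_neg (by simp : ¬ (("+" : String) == "-") = true)]
          rw [herase]
          cases r with
          | nil =>
            rw [fLoop, dif_neg (by simp)]
            simp [sufF]
          | cons z r' =>
            have hL : pre ++ z :: r' = (pre ++ [z]) ++ r' := by simp
            have hlen2 : pre.length + 1 = (pre ++ [z]).length := by simp
            rw [hL, hlen2, IH r'.length (by simp at hlen; omega) r' (pre ++ [z]) rfl]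
            simp [sufF]
        · have hL : pre ++ x :: r = (pre ++ [x]) ++ r := by simp
          have hlen2 : pre.length + 1 = (pre ++ [x]).length := by simp
          simp only [if_neg (by simp [hminus] : ¬ (x == "-") = true), if_neg (by simp [hplus] : ¬ (x == "+") = true)]
          rw [hL, hlen2, IH r.length (by simp at hlen; omega) r (pre ++ [x]) rfl]
          conv_rhs => rw [sufF.eq_def]
          simp [hminus, hplus]

theorem fAltLoop_eq : ∀ (n : Nat) (suf pre out : List String), suf.length = n →
    okF suf = true →
    fAltLoop (pre ++ suf) pre.length out = out ++ sufF suf := by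
  intro n
  induction n using Nat.strong_induction_on with
  | _ n IH =>
    intro suf pre out hlen hok
    cases suf with
    | nil => rw [fAltLoop]; simp [sufF]
    | cons x r =>
      have hx : (pre ++ x :: r)[pre.length]'(by simp) = x := by simp
      have h1 : (pre ++ x :: r)[pre.length + 1]? = r[0]? := by
        rw [List.getElem?_append_right (by omega)]; simp
      rw [fAltLoop, dif_pos (by simp : pre.length < (pre ++ x :: r).length)]
      simp only [hx, h1]
      by_cases hminus : x = "-"
      · subst hminus
        cases r with
        | nil => simp [okF] at hok
        | cons y r' =>
          have hok' : okF r' = true := by simpa [okF] using hok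
          have hL : pre ++ ("-" : String) :: y :: r' = (pre ++ ["-", y]) ++ r' := by simp
          have hlen2 : pre.length + 1 + 1 = (pre ++ [("-" : String), y]).length := by simp
          simp only [beq_self_eq_true, if_true, List.getElem?_cons_zero]
          rw [hL, hlen2, IH r'.length (by simp at hlen; omega) r' (pre ++ ["-", y]) (out ++ [("-" : String) ++ y]) rfl hok']
          simp [sufF]
      · by_cases hplus : x = "+"
        · subst hplus
          simp only [if_neg (by simp : ¬ (("+" : String) == "-") = true), beq_self_eq_true, if_true]
          cases r with
          | nil =>
            rw [fAltLoop, dif_neg (by simp)]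
            simp [sufF]
          | cons z r' =>
            have hok' : okF r' = true := by simpa [okF] using hok
            have hL : pre ++ ("+" : String) :: z :: r' = (pre ++ ["+", z]) ++ r' := by simp
            have hlen2 : pre.length + 1 + 1 = (pre ++ [("+" : String), z]).length := by simp
            simp only [List.getElem?_cons_zero]
            rw [hL, hlen2, IH r'.length (by simp at hlen; omega) r' (pre ++ ["+", z]) (out ++ [z]) rfl hok']
            simp [sufF]
        · have hok' : okF r = true := by
            rw [okF.eq_def] at hok; simpa [hminus, hplus] using hok
          have hL : pre ++ x :: r = (pre ++ [x]) ++ r := by simp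
          have hlen2 : pre.length + 1 = (pre ++ [x]).length := by simp
          simp only [if_neg (by simp [hminus] : ¬ (x == "-") = true), if_neg (by simp [hplus] : ¬ (x == "+") = true)]
          rw [hL, hlen2, IH r.length (by simp at hlen; omega) r (pre ++ [x]) (out ++ [x]) rfl hok']
          conv_rhs => rw [sufF.eq_def]
          simp [hminus, hplus]

-- ===== VERDICT (by name: the statement is the Claim_ definition above) =====
theorem f_spec : Claim_equal_f := by
  intro lstt _ hpre
  unfold Spec_f f f_alt
  have h1 := fLoop_eq lstt.length lstt [] rfl
  have h2 := fAltLoop_eq lstt.length lstt [] [] rfl hpre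
  simpa using h1.trans h2.symm
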